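-- pv_equiv track=rewrite | github.com/Jittor/jittor | python/jittor/compiler.py | moveback_flags
-- ===== SOURCE A (Python) =====
-- def shsplit(s):
--     s1 = s.split(' ')
--     s2 = []
--     count = 0
--     for s in s1:
--         nc = s.count('"') + s.count('\'')
--         if count&1:
--             count += nc
--             s2[-1] += " "
--             s2[-1] += s
--         else:
--             count = nc
--             s2.append(s)
--     return s2
--
-- def moveback_flags(flags, rm_flags):
--     flags = shsplit(flags)
--     output = []
--     output2 = []
--     for s in flags:
--         ss = s.replace("\"", "")
--         for rm in rm_flags:
--             if ss.startswith(rm) or ss.endswith(rm):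
--                 output2.append(s)
--                 break
--         else:
--             output.append(s)
--     return " ".join(output+output2)
-- ===== SOURCE B (Python) =====
-- def shsplit(s):
--     s1 = s.split(' ')
--     s2 = []
--     count = 0
--     for s in s1:
--         nc = s.count('"') + s.count('\'')
--         if count&1:
--             count += nc
--             s2[-1] += " "
--             s2[-1] += s
--         else:
--             count = nc
--             s2.append(s)
--     return s2
--
-- def moveback_flags(flags, rm_flags):
--     def moved(s):
--         ss = s.replace('"', '')
--         return any(ss.startswith(rm) or ss.endswith(rm) for rm in rm_flags)
--     return " ".join(sorted(shsplit(flags), key=moved))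
-- ===== Notes on version B (the rewrite author's own statement) =====
-- stated objective: idiomatic
-- what changed: Replaces A's two-accumulator partition loop with an inner for/else break scan by a single expression: a stable sort of the shsplit tokens keyed on an any()-based match predicate (False keys sort before True, stability preserves each group's order).
import Mathlib
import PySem

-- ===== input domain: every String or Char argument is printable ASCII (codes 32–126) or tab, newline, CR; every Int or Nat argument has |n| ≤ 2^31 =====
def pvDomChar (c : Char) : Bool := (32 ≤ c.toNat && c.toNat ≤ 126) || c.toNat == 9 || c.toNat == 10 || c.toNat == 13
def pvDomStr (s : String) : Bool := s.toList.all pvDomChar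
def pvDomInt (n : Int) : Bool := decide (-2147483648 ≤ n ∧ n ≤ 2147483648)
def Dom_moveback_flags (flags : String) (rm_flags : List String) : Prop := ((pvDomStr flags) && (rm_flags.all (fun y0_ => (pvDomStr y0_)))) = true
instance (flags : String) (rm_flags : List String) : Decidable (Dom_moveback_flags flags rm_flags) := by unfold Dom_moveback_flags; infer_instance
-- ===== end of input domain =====

-- B replaces A's two-accumulator partition loop (with an inner for/else break scan) by a single
-- stable sort keyed on an any()-based match predicate; objective: idiomatic, same asymptotics.


-- ===== PORT A =====
-- shsplit, shared verbatim by both Pythons (Source B keeps it unchanged), ported once.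
-- s2[-1] is only read when count is odd, which forces s2 ≠ [] (the first token always
-- takes the even branch), so getLastD's default "" is unreachable.
def pvShsplit (s : String) : List String :=
  ((PySem.Str.split? s " ").getD []).foldl
    (fun (st : List String × Int) tok =>
      let nc : Int := (PySem.Str.count tok "\"" : Int) + (PySem.Str.count tok "'" : Int)
      if PySem.Int.band st.2 1 ≠ 0 then
        (st.1.dropLast ++ [st.1.getLastD "" ++ " " ++ tok], st.2 + nc)
      else
        (st.1 ++ [tok], nc))
    ([], 0) |>.1

-- A's inner 'for rm in rm_flags: … break / else' scan
def pvMatchLoop (ss : String) (rms : List String) : Bool :=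
  match rms with
  | [] => false
  | rm :: t =>
    if PySem.Str.startswith ss rm || PySem.Str.endswith ss rm then true
    else pvMatchLoop ss t

def moveback_flags (flags : String) (rm_flags : List String) : String :=
  let fl := pvShsplit flags
  let st := fl.foldl
    (fun (st : List String × List String) s =>
      let ss := PySem.Str.replace s "\"" ""
      if pvMatchLoop ss rm_flags then (st.1, st.2 ++ [s]) else (st.1 ++ [s], st.2))
    ([], [])
  PySem.Str.join " " (st.1 ++ st.2)

-- ===== PORT B =====
-- B's key function 'moved'
def pvMoved (rm_flags : List String) (s : String) : Bool :=
  let ss := PySem.Str.replace s "\"" ""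
  rm_flags.any (fun rm => PySem.Str.startswith ss rm || PySem.Str.endswith ss rm)

def moveback_flags_alt (flags : String) (rm_flags : List String) : String :=
  PySem.Str.join " " (PySem.List.sorted (pvShsplit flags) (pvMoved rm_flags) false)

-- ===== PRECONDITION & SPEC =====
def Spec_moveback_flags (flags : String) (rm_flags : List String) (out : String) : Prop := out = moveback_flags_alt flags rm_flags
instance (flags : String) (rm_flags : List String) (out : String) : Decidable (Spec_moveback_flags flags rm_flags out) := by unfold Spec_moveback_flags; infer_instance

-- ===== CLAIM (what is proved, stated in full; the proofs are below) =====
def Claim_equal_moveback_flags : Prop := ∀ (flags : String) (rm_flags : List String), Dom_moveback_flags flags rm_flags → Spec_moveback_flags flags rm_flags (moveback_flags flags rm_flags)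

-- ===== LEMMAS AND PROOFS =====

theorem pvMatchLoop_eq_any (ss : String) (rms : List String) :
    pvMatchLoop ss rms
      = rms.any (fun rm => PySem.Str.startswith ss rm || PySem.Str.endswith ss rm) := by
  induction rms with
  | nil => rfl
  | cons rm t ih =>
    rw [List.any_cons, ← ih]
    cases h : (PySem.Str.startswith ss rm || PySem.Str.endswith ss rm) with
    | true =>
      simp only [pvMatchLoop, h, Bool.true_or]
      simp
    | false =>
      simp only [pvMatchLoop, h, Bool.false_or]
      rw [if_neg Bool.false_ne_true]

-- inserting into a False-block ++ True-block keeps the partition shape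
theorem insertBy_partition {α : Type} (key : α → Bool) (x : α) :
    ∀ (F T : List α), (∀ y ∈ F, key y = false) → (∀ y ∈ T, key y = true) →
    PySem.List.insertBy (fun a b => decide (key a < key b)) x (F ++ T)
      = if key x then (F ++ T) ++ [x] else F ++ x :: T := by
  intro F T hF hT
  cases hx : key x with
  | true =>
    rw [if_pos rfl]
    apply PySem.List.insertBy_of_forall_not_before
    intro y hy
    rcases List.mem_append.1 hy with h | h
    · rw [hx, hF y h]; rfl
    · rw [hx, hT y h]; rfl
  | false =>
    rw [if_neg Bool.false_ne_true]
    induction F with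
    | nil =>
      cases T with
      | nil => rfl
      | cons y ys =>
        have hy : key y = true := hT y List.mem_cons_self
        have hd : decide (key x < key y) = true := by rw [hx, hy]; rfl
        simp only [List.nil_append, PySem.List.insertBy, hd]
        simp
    | cons f F' ihF =>
      have hf : key f = false := hF f List.mem_cons_self
      have hd : decide (key x < key f) = false := by rw [hx, hf]; rfl
      simp only [List.cons_append, PySem.List.insertBy, hd]
      rw [if_neg Bool.false_ne_true]
      exact congrArg (f :: ·) (ihF (fun y hy => hF y (List.mem_cons_of_mem f hy)))

theorem foldl_insertBy_partition {α : Type} (key : α → Bool) :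
    ∀ (xs F T : List α), (∀ y ∈ F, key y = false) → (∀ y ∈ T, key y = true) →
    xs.foldl (fun acc x => PySem.List.insertBy (fun a b => decide (key a < key b)) x acc) (F ++ T)
      = F ++ xs.filter (fun x => !key x) ++ (T ++ xs.filter key) := by
  intro xs
  induction xs with
  | nil => intro F T hF hT; simp
  | cons x xs ih =>
    intro F T hF hT
    rw [List.foldl_cons, insertBy_partition key x F T hF hT]
    cases hx : key x with
    | true =>
      rw [if_pos rfl]
      have hT' : ∀ y ∈ T ++ [x], key y = true := by
        intro y hy
        rcases List.mem_append.1 hy with h | h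
        · exact hT y h
        · simp at h; rw [h, hx]
      have hstep : (F ++ T) ++ [x] = F ++ (T ++ [x]) := by simp
      rw [hstep, ih F (T ++ [x]) hF hT']
      simp [hx]
    | false =>
      rw [if_neg Bool.false_ne_true]
      have hF' : ∀ y ∈ F ++ [x], key y = false := by
        intro y hy
        rcases List.mem_append.1 hy with h | h
        · exact hF y h
        · simp at h; rw [h, hx]
      have hstep : F ++ x :: T = (F ++ [x]) ++ T := by simp
      rw [hstep, ih (F ++ [x]) T hF' hT]
      simp [hx]

-- Python's stable sort on a Bool key is "non-matching first, matching last, each group in order"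
theorem sorted_bool_partition {α : Type} (xs : List α) (key : α → Bool) :
    PySem.List.sorted xs key false = xs.filter (fun x => !key x) ++ xs.filter key := by
  rw [PySem.List.sorted_eq_foldl_insertBy]
  have h := foldl_insertBy_partition key xs [] [] (by simp) (by simp)
  simpa using h

theorem moveback_flags_eq (flags : String) (rm_flags : List String) :
    moveback_flags flags rm_flags = moveback_flags_alt flags rm_flags := by
  have hcond : ∀ s, pvMatchLoop (PySem.Str.replace s "\"" "") rm_flags = pvMoved rm_flags s := by
    intro s; rw [pvMatchLoop_eq_any]; rfl
  show PySem.Str.join " "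
      (((pvShsplit flags).foldl
          (fun (st : List String × List String) s =>
            if pvMatchLoop (PySem.Str.replace s "\"" "") rm_flags then (st.1, st.2 ++ [s])
            else (st.1 ++ [s], st.2)) ([], [])).1
        ++ ((pvShsplit flags).foldl
          (fun (st : List String × List String) s =>
            if pvMatchLoop (PySem.Str.replace s "\"" "") rm_flags then (st.1, st.2 ++ [s])
            else (st.1 ++ [s], st.2)) ([], [])).2)
      = PySem.Str.join " " (PySem.List.sorted (pvShsplit flags) (pvMoved rm_flags) false)
  rw [sorted_bool_partition]
  have hswap := PySem.List.foldl_congr_mem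
      (l := pvShsplit flags) (init := (([], []) : List String × List String))
      (f := fun (st : List String × List String) s =>
        if pvMatchLoop (PySem.Str.replace s "\"" "") rm_flags then (st.1, st.2 ++ [s])
        else (st.1 ++ [s], st.2))
      (g := fun (st : List String × List String) s =>
        ((if pvMoved rm_flags s then st.1 else st.1 ++ [s]),
         (if pvMoved rm_flags s then st.2 ++ [s] else st.2)))
      (by intro acc s _; simp only [hcond s]; cases pvMoved rm_flags s <;> simp)
  rw [hswap]
  rw [PySem.List.foldl_prod_mk
        (f := fun acc s => if pvMoved rm_flags s then acc else acc ++ [s])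
        (g := fun acc s => if pvMoved rm_flags s then acc ++ [s] else acc)]
  have h1 : (pvShsplit flags).foldl
      (fun acc s => if pvMoved rm_flags s then acc else acc ++ [s]) []
      = (pvShsplit flags).filter (fun s => !pvMoved rm_flags s) := by
    have hswap1 := PySem.List.foldl_congr_mem
        (l := pvShsplit flags) (init := ([] : List String))
        (f := fun acc s => if pvMoved rm_flags s then acc else acc ++ [s])
        (g := fun acc s => if (!pvMoved rm_flags s) then acc ++ [s] else acc)
        (by intro acc s _; cases h : pvMoved rm_flags s <;> simp [h])
    rw [hswap1]
    simpa using PySem.List.foldl_append_if_eq_filter (fun s => !pvMoved rm_flags s)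
      (l := pvShsplit flags) (acc := [])
  have h2 : (pvShsplit flags).foldl
      (fun acc s => if pvMoved rm_flags s then acc ++ [s] else acc) []
      = (pvShsplit flags).filter (pvMoved rm_flags) := by
    simpa using PySem.List.foldl_append_if_eq_filter (pvMoved rm_flags)
      (l := pvShsplit flags) (acc := [])
  rw [h1, h2]

-- ===== VERDICT (by name: the statement is the Claim_ definition above) =====
theorem moveback_flags_spec : Claim_equal_moveback_flags :=
  fun flags rm_flags _ => moveback_flags_eq flags rm_flags
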